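-- pv_equiv track=rewrite | github.com/Arifuzzamanjoy/youtube_video_from_stock_image_-_video_-ai_sync | generate_subtitles.py | split_into_sentences
-- ===== SOURCE A (Python) =====
-- from typing import Optional, List, Tuple
--
-- def split_into_sentences(text: str) -> List[str]:
--     """Split text into short phrases for mobile-friendly subtitles"""
--     import re
--
--     # Split text into words
--     words = text.split()
--     phrases = []
--     current_phrase = []
--
--     for word in words:
--         current_phrase.append(word)
--         # Create subtitle every 4-5 words or at punctuation
--         if len(current_phrase) >= 4 or word.endswith(('.', '!', '?', ',', ':')):
--             phrase_text = ' '.join(current_phrase).strip('.,!?:')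
--             if phrase_text:
--                 phrases.append(phrase_text)
--             current_phrase = []
--
--     # Add remaining words
--     if current_phrase:
--         phrase_text = ' '.join(current_phrase).strip('.,!?:')
--         if phrase_text:
--             phrases.append(phrase_text)
--
--     return phrases if phrases else ["No subtitles"]
-- ===== SOURCE B (Python) =====
-- def split_into_sentences(text: str):
--     """Split text into short phrases for mobile-friendly subtitles.
--
--     Two-phase alternative: first cut the word list into segments at
--     punctuation-ending words, then slice each segment into groups of
--     up to 4 words.
--     """
--     PUNCT = ('.', '!', '?', ',', ':')
--     # Phase 1: segments, closed by a word ending with punctuation.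
--     segments = []
--     seg = []
--     for w in text.split():
--         seg.append(w)
--         if w.endswith(PUNCT):
--             segments.append(seg)
--             seg = []
--     if seg:
--         segments.append(seg)
--     # Phase 2: chunk each segment into groups of up to 4 words.
--     phrases = []
--     for seg in segments:
--         while seg:
--             group, seg = seg[:4], seg[4:]
--             p = ' '.join(group).strip('.,!?:')
--             if p:
--                 phrases.append(p)
--     return phrases if phrases else ["No subtitles"]
-- ===== Notes on version B (the rewrite author's own statement) =====
-- stated objective: alternative
-- what changed: Replaces A's single pass with a flush counter by a two-phase structure: first cut the word list into segments at punctuation-ending words, then slice each segment into groups of up to 4 words.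
import Mathlib
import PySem

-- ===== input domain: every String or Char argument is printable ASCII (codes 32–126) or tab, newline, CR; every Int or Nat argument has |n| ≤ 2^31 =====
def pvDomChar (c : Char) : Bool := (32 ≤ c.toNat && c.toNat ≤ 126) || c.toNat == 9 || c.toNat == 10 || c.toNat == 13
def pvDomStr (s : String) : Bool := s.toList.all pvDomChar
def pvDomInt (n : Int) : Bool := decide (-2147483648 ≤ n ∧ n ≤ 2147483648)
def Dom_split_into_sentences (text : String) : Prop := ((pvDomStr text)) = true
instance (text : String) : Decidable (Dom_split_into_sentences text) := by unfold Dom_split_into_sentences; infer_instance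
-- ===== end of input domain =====

-- B replaces A's single flush-counter pass by a two-phase structure (segment at
-- punctuation-ending words, then slice each segment into groups of up to 4 words);
-- objective: alternative decomposition, same cost.

-- ===== PORT A =====

-- word.endswith(('.', '!', '?', ',', ':'))  — tuple endswith = any of the suffixes
def pvEndsPunct (w : String) : Bool :=
  PySem.Str.endswith w "." || PySem.Str.endswith w "!" || PySem.Str.endswith w "?" ||
  PySem.Str.endswith w "," || PySem.Str.endswith w ":"

-- ' '.join(cur).strip('.,!?:')
def pvPhraseOf (cur : List String) : String :=
  PySem.Str.stripChars (PySem.Str.join " " cur) ".,!?:"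

def split_into_sentences (text : String) : List String :=
  let words := PySem.Str.split₀ text
  let st := words.foldl
    (fun (st : List String × List String) word =>
      let cur := st.2 ++ [word]
      if cur.length ≥ 4 ∨ pvEndsPunct word then
        let phrase_text := pvPhraseOf cur
        (if phrase_text ≠ "" then st.1 ++ [phrase_text] else st.1, [])
      else (st.1, cur))
    ([], [])
  let phrases :=
    if st.2 ≠ [] then
      let phrase_text := pvPhraseOf st.2
      if phrase_text ≠ "" then st.1 ++ [phrase_text] else st.1
    else st.1
  if phrases ≠ [] then phrases else ["No subtitles"]

-- ===== PORT B =====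

-- while seg: group, seg = seg[:4], seg[4:]; … (the slices are PySem.List.slice)
def pvChunkGo : List String → List String → List String
  | [], phrases => phrases
  | x :: t, phrases =>
    let group := PySem.List.slice (x :: t) none (some 4)
    let rest := PySem.List.slice (x :: t) (some 4) none
    let p := pvPhraseOf group
    pvChunkGo rest (if p ≠ "" then phrases ++ [p] else phrases)
termination_by seg _ => seg.length
decreasing_by
  rw [PySem.List.slice_from (x :: t) (by norm_num : (0:Int) ≤ 4)]
  simp

def split_into_sentences_alt (text : String) : List String :=
  -- Phase 1: segments closed at punctuation-ending words
  let st := (PySem.Str.split₀ text).foldl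
    (fun (st : List (List String) × List String) w =>
      let seg := st.2 ++ [w]
      if pvEndsPunct w then (st.1 ++ [seg], []) else (st.1, seg))
    ([], [])
  let segments := if st.2 ≠ [] then st.1 ++ [st.2] else st.1
  -- Phase 2: chunk each segment into groups of up to 4 words
  let phrases := segments.foldl (fun acc seg => pvChunkGo seg acc) []
  if phrases ≠ [] then phrases else ["No subtitles"]

-- ===== PRECONDITION & SPEC =====
def Spec_split_into_sentences (text : String) (out : List String) : Prop := out = split_into_sentences_alt text
instance (text : String) (out : List String) : Decidable (Spec_split_into_sentences text out) := by unfold Spec_split_into_sentences; infer_instance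

-- ===== CLAIM (what is proved, stated in full; the proofs are below) =====
def Claim_equal_split_into_sentences : Prop := ∀ (text : String), Dom_split_into_sentences text → Spec_split_into_sentences text (split_into_sentences text)

-- ===== LEMMAS AND PROOFS =====

-- emit one phrase (spec-level, cons form)
def pvEmit (cur : List String) (rest : List String) : List String :=
  if pvPhraseOf cur ≠ "" then pvPhraseOf cur :: rest else rest

-- A's loop body and finalization, named
def pvStepA (st : List String × List String) (word : String) : List String × List String :=
  let cur := st.2 ++ [word]
  if cur.length ≥ 4 ∨ pvEndsPunct word then
    (if pvPhraseOf cur ≠ "" then st.1 ++ [pvPhraseOf cur] else st.1, [])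
  else (st.1, cur)

def pvFinishA (st : List String × List String) : List String :=
  if st.2 ≠ [] then
    (if pvPhraseOf st.2 ≠ "" then st.1 ++ [pvPhraseOf st.2] else st.1)
  else st.1

-- B's phase-1 body and finalization, named
def pvStepSeg (st : List (List String) × List String) (w : String) :
    List (List String) × List String :=
  if pvEndsPunct w then (st.1 ++ [st.2 ++ [w]], []) else (st.1, st.2 ++ [w])

def pvFinishSeg (st : List (List String) × List String) : List (List String) :=
  if st.2 ≠ [] then st.1 ++ [st.2] else st.1

-- recursive form of A's loop
def pvGoA (cur : List String) : List String → List String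
  | [] => if cur ≠ [] then pvEmit cur [] else []
  | w :: ws =>
    if (cur ++ [w]).length ≥ 4 ∨ pvEndsPunct w then pvEmit (cur ++ [w]) (pvGoA [] ws)
    else pvGoA (cur ++ [w]) ws

-- recursive form of B's phase 1
def pvGoSeg (cur : List String) : List String → List (List String)
  | [] => if cur ≠ [] then [cur] else []
  | w :: ws =>
    if pvEndsPunct w then (cur ++ [w]) :: pvGoSeg [] ws else pvGoSeg (cur ++ [w]) ws

-- spec-level chunking of one segment
def pvChunk : List String → List String
  | [] => []
  | x :: t => pvEmit ((x :: t).take 4) (pvChunk ((x :: t).drop 4))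
termination_by seg => seg.length
decreasing_by simp

theorem pvChunkGo_eq (seg acc : List String) : pvChunkGo seg acc = acc ++ pvChunk seg := by
  induction seg using pvChunk.induct generalizing acc with
  | case1 => simp [pvChunkGo, pvChunk]
  | case2 x t ih =>
    rw [pvChunkGo, pvChunk]
    rw [PySem.List.slice_from (x :: t) (by norm_num : (0:Int) ≤ 4),
      PySem.List.slice_to (x :: t) (by norm_num : (0:Int) ≤ 4)]
    show pvChunkGo ((x :: t).drop 4)
        (if pvPhraseOf ((x :: t).take 4) ≠ "" then acc ++ [pvPhraseOf ((x :: t).take 4)] else acc) =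
      acc ++ pvEmit ((x :: t).take 4) (pvChunk ((x :: t).drop 4))
    rw [ih, pvEmit]
    by_cases hp : pvPhraseOf ((x :: t).take 4) ≠ ""
    · rw [if_pos hp, if_pos hp, List.append_assoc]; rfl
    · rw [if_neg hp, if_neg hp]

-- A's foldl equals pvGoA, phrases accumulated on the left
theorem pvFoldA_eq (ws : List String) : ∀ ph cur,
    pvFinishA (ws.foldl pvStepA (ph, cur)) = ph ++ pvGoA cur ws := by
  induction ws with
  | nil =>
    intro ph cur
    simp only [List.foldl_nil, pvFinishA, pvGoA]
    by_cases h : cur = [] <;> simp [h, pvEmit] <;> split <;> simp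
  | cons w ws ih =>
    intro ph cur
    rw [List.foldl_cons, pvGoA]
    by_cases h : (cur ++ [w]).length ≥ 4 ∨ pvEndsPunct w = true
    · rw [pvStepA, if_pos h, if_pos h]
      by_cases hp : pvPhraseOf (cur ++ [w]) ≠ ""
      · rw [if_pos hp, ih, pvEmit, if_pos hp]; simp
      · rw [if_neg hp, ih, pvEmit, if_neg hp]
    · rw [pvStepA, if_neg h, if_neg h, ih]

-- B's phase-1 foldl equals pvGoSeg, segments accumulated on the left
theorem pvFoldSeg_eq (ws : List String) : ∀ sg cur,
    pvFinishSeg (ws.foldl pvStepSeg (sg, cur)) = sg ++ pvGoSeg cur ws := by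
  induction ws with
  | nil =>
    intro sg cur
    simp only [List.foldl_nil, pvFinishSeg, pvGoSeg]
    by_cases h : cur = [] <;> simp [h]
  | cons w ws ih =>
    intro sg cur
    rw [List.foldl_cons, pvGoSeg]
    by_cases h : pvEndsPunct w = true
    · rw [pvStepSeg, if_pos h, if_pos h, ih]; simp
    · rw [pvStepSeg, if_neg h, if_neg h, ih]

-- B's phase-2 foldl over segments flattens the chunks
theorem pvFoldChunk_eq (segs : List (List String)) : ∀ acc,
    segs.foldl (fun acc seg => pvChunkGo seg acc) acc = acc ++ segs.flatMap pvChunk := by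
  induction segs with
  | nil => simp
  | cons s ss ih =>
    intro acc
    rw [List.foldl_cons, ih, pvChunkGo_eq, List.flatMap_cons, List.append_assoc]

def pvConsFirst (c : List String) : List (List String) → List (List String)
  | [] => [c]
  | s :: ss => (c ++ s) :: ss

theorem pvGoSeg_prefix (ws : List String) : ∀ c d, c ≠ [] →
    pvGoSeg (c ++ d) ws = pvConsFirst c (pvGoSeg d ws) := by
  induction ws with
  | nil =>
    intro c d hc
    by_cases hd : d = [] <;> simp [pvGoSeg, pvConsFirst, hd, hc]
  | cons w ws ih =>
    intro c d hc
    rw [pvGoSeg, pvGoSeg]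
    by_cases h : pvEndsPunct w = true
    · simp [h, pvConsFirst]
    · rw [if_neg h, if_neg h, List.append_assoc, ih c (d ++ [w]) hc]

theorem pvChunk_four (c s : List String) (hc : c.length = 4) :
    pvChunk (c ++ s) = pvEmit c (pvChunk s) := by
  match c, hc with
  | [a, b, c', d], _ => simp [pvChunk]

-- main invariant: A's recursion = flattened chunks of B's segments
theorem pvMain (ws : List String) : ∀ cur, cur.length < 4 →
    pvGoA cur ws = (pvGoSeg cur ws).flatMap pvChunk := by
  induction ws with
  | nil =>
    intro cur hlen
    by_cases h : cur = []
    · simp [pvGoA, pvGoSeg, h]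
    · rw [pvGoA, pvGoSeg, if_pos h, if_pos h]
      simp only [List.flatMap_cons, List.flatMap_nil, List.append_nil]
      match cur, h with
      | x :: t, _ =>
        rw [pvChunk]
        have hlen' : (x :: t).length < 4 := hlen
        rw [List.drop_eq_nil_of_le (by simp at hlen' ⊢; omega),
          List.take_of_length_le (by omega), pvChunk]
  | cons w ws ih =>
    intro cur hlen
    rw [pvGoA, pvGoSeg]
    by_cases hp : pvEndsPunct w = true
    · rw [if_pos (Or.inr hp), if_pos hp]
      rw [List.flatMap_cons, ih [] (by simp)]
      have hle : (cur ++ [w]).length ≤ 4 := by simp; omega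
      match h : cur ++ [w], List.append_ne_nil_of_right_ne_nil cur (by simp : [w] ≠ ([] : List String)) with
      | x :: t, _ =>
        rw [pvChunk]
        have hlt : (x :: t).length ≤ 4 := h ▸ hle
        rw [List.drop_eq_nil_of_le (by omega), List.take_of_length_le (by omega), pvChunk]
        unfold pvEmit; split <;> simp
    · by_cases h4 : (cur ++ [w]).length ≥ 4
      · rw [if_pos (Or.inl h4), if_neg hp]
        have hc4 : (cur ++ [w]).length = 4 := by simp at h4 ⊢; omega
        have hpre := pvGoSeg_prefix ws (cur ++ [w]) []
          (List.append_ne_nil_of_right_ne_nil cur (by simp))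
        simp only [List.append_nil] at hpre
        rw [hpre, ih [] (by simp)]
        cases hgs : pvGoSeg [] ws with
        | nil =>
          have h0 := pvChunk_four (cur ++ [w]) [] hc4
          rw [List.append_nil] at h0
          simp [pvConsFirst, h0, pvChunk]
        | cons s ss =>
          simp only [pvConsFirst, List.flatMap_cons, pvChunk_four _ _ hc4]
          unfold pvEmit; split <;> simp
      · rw [if_neg (by push Not; exact ⟨by omega, by simpa using hp⟩), if_neg hp]
        exact ih (cur ++ [w]) (by simp at h4 ⊢; omega)

-- ===== VERDICT (by name: the statement is the Claim_ definition above) =====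
theorem split_into_sentences_spec : Claim_equal_split_into_sentences := by
  intro text _
  show split_into_sentences text = split_into_sentences_alt text
  have hA : split_into_sentences text =
      (if pvFinishA ((PySem.Str.split₀ text).foldl pvStepA ([], [])) ≠ [] then
        pvFinishA ((PySem.Str.split₀ text).foldl pvStepA ([], []))
      else ["No subtitles"]) := rfl
  have hB : split_into_sentences_alt text =
      (if (pvFinishSeg ((PySem.Str.split₀ text).foldl pvStepSeg ([], []))).foldl
            (fun acc seg => pvChunkGo seg acc) [] ≠ [] then
        (pvFinishSeg ((PySem.Str.split₀ text).foldl pvStepSeg ([], []))).foldl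
            (fun acc seg => pvChunkGo seg acc) []
      else ["No subtitles"]) := rfl
  rw [hA, hB, pvFoldA_eq, pvFoldSeg_eq, List.nil_append, List.nil_append, pvFoldChunk_eq,
    List.nil_append, pvMain (PySem.Str.split₀ text) [] (by simp)]
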